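-- pv_equiv track=rewrite | github.com/Rickath/TicTacToe | Simulateur_parties/Simulateur_parties_bruteforce.py | bruteforce_parties
-- ===== SOURCE A (Python) =====
-- def fin_valide(values):
--     winX = False
--     winO = False
--     nb_vide = sum(1 for case in values if case=="")
--     listeX = [i for i in range(9) if values[i] == "X"]
--     listeO = [i for i in range(9) if values[i] == "O"]
--     for ligne in [(0, 1, 2), (3, 4, 5), (6, 7, 8), (0, 3, 6), (1, 4, 7),
--                   (2, 5, 8), (0, 4, 8), (2, 4, 6)]:
--         winX = winX or all(x in listeX for x in ligne)
--         winO = winO or all(x in listeO for x in ligne)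
--     draw = not(winX or winO) and nb_vide==0
--     return (winX ^ winO) ^ draw
--
-- def bruteforce_parties(parties,partie,values,tourX):
--     #On définit les positions disponibles
--     positions = [i for i in range(9) if values[i]==""]
--     #Tant qu'il reste des positions valides, on va parcourir tous les scénarios de jeux possibles
--     if (len(positions) > 0):
--         #On va jouer successivement chacune des positions possibles
--         for case in positions:
--             #On recopie la grille
--             cpy_values = values.copy()
--             #Si c'est le tour de X, X joue sur case et si la partie n'est pas finie on rappelle la fonction avec O qui joue
--             if (tourX):
--                 cpy_values[case] = "X"
--                 partie_new = partie+"X"+str(case)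
--                 if (fin_valide(cpy_values)):
--                     parties[partie_new] = cpy_values
--                 else:
--                     bruteforce_parties(parties,partie_new,cpy_values,tourX=False)
--             #Sinon c'est le tour de O, O joue case et si la partie n'est pas finie on rappelle la fonction avec X qui joue
--             else:
--                 cpy_values[case] = "O"
--                 partie_new = partie+"O"+str(case)
--                 if (fin_valide(cpy_values)):
--                     parties[partie_new] = cpy_values
--                 else:
--                     bruteforce_parties(parties,partie_new,cpy_values,tourX=True)
--     return parties
-- ===== SOURCE B (Python) =====
-- LINES = [(0, 1, 2), (3, 4, 5), (6, 7, 8), (0, 3, 6), (1, 4, 7),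
--          (2, 5, 8), (0, 4, 8), (2, 4, 6)]
--
-- def fin_valide(values):
--     winX = any(all(values[i] == "X" for i in line) for line in LINES)
--     winO = any(all(values[i] == "O" for i in line) for line in LINES)
--     draw = not (winX or winO) and "" not in values
--     return (winX ^ winO) ^ draw
--
-- def _games(partie, values, tourX):
--     """Pure generator: the list of (key, final grid) pairs of all finished games
--     reachable from this position, in depth-first order."""
--     sym = "X" if tourX else "O"
--     out = []
--     for case in range(9):
--         if values[case] != "":
--             continue
--         cpy = values.copy()
--         cpy[case] = sym
--         key = partie + sym + str(case)
--         if fin_valide(cpy):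
--             out.append((key, cpy))
--         else:
--             out.extend(_games(key, cpy, not tourX))
--     return out
--
-- def bruteforce_parties(parties, partie, values, tourX):
--     for k, v in _games(partie, values, tourX):
--         parties[k] = v
--     return parties
-- ===== Notes on version B (the rewrite author's own statement) =====
-- stated objective: alternative
-- what changed: A threads the result dict through the tree recursion (mutating it at every leaf); B separates concerns: a pure recursive generator builds the flat list of (key, grid) pairs of all finished games, and bruteforce_parties just inserts that list into the dict in one final loop; fin_valide is also restructured as any/all directly over the grid instead of building index lists.
import Mathlib
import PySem

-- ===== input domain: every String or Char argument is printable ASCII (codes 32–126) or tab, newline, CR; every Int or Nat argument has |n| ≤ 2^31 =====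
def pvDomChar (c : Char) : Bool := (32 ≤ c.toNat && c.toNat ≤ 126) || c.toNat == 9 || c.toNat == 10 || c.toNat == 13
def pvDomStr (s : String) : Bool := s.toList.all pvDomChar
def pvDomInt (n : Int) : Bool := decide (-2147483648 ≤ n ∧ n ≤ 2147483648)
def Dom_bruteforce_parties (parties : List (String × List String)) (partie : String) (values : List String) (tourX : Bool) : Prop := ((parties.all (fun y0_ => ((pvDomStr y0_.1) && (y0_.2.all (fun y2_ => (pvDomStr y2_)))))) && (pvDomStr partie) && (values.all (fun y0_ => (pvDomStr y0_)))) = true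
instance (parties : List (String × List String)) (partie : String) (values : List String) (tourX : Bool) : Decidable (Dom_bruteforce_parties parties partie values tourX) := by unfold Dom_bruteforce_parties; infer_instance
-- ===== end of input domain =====

-- B restructures A's dict-threading tree recursion into a pure generator of (key, grid)
-- pairs followed by one insertion loop; equivalence of the RETURN value is proved (the
-- Python parties dict is mutated in place by both A and B identically).

-- ===== PORT A =====

-- parties[key] = v on the association list (Python dict assignment; overwrite keeps
-- position, new keys append).  Used by both ports (both Pythons do `parties[k] = v`).
def dInsert (l : List (String × List String)) (k : String) (v : List String) : List (String × List String) :=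
  ((PySem.Dict.mk l).insert k v).items

-- [i for i in range(9) if values[i] == ""].  Exact for values of length ≥ 9 (Pre_):
-- the default "X" never equals "", so it can never add a position (Python raises instead).
def posOf (values : List String) : List Nat :=
  (List.range 9).filter (fun i => values.getD i "X" == "")

-- number of empty cells among the first nine; termination measure of both recursions
def nempty (values : List String) : Nat := (posOf values).length

def pyLines : List (Nat × Nat × Nat) :=
  [(0,1,2), (3,4,5), (6,7,8), (0,3,6), (1,4,7), (2,5,8), (0,4,8), (2,4,6)]

-- transliteration of A's fin_valide (values[i] → getD, exact for length ≥ 9)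
def fin_valide (values : List String) : Bool :=
  let nb_vide := (values.filter (fun case => case == "")).length
  let listeX := (List.range 9).filter (fun i => values.getD i "" == "X")
  let listeO := (List.range 9).filter (fun i => values.getD i "" == "O")
  let wins := pyLines.foldl (fun (w : Bool × Bool) ligne =>
      (w.1 || (decide (ligne.1 ∈ listeX) && decide (ligne.2.1 ∈ listeX) && decide (ligne.2.2 ∈ listeX)),
       w.2 || (decide (ligne.1 ∈ listeO) && decide (ligne.2.1 ∈ listeO) && decide (ligne.2.2 ∈ listeO))))
    (false, false)
  let draw := !(wins.1 || wins.2) && (nb_vide == 0)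
  (wins.1.xor wins.2).xor draw

-- termination: playing a symbol on an empty cell strictly decreases nempty
theorem pv_countP_lt (p q : Nat → Bool) (cs : List Nat)
    (hmono : ∀ x ∈ cs, q x = true → p x = true)
    (c : Nat) (hc : c ∈ cs) (hp : p c = true) (hq : q c = false) :
    cs.countP q < cs.countP p := by
  induction cs with
  | nil => cases hc
  | cons a cs ih =>
    rcases List.mem_cons.mp hc with rfl | hc'
    · have h1 : cs.countP q ≤ cs.countP p :=
        List.countP_mono_left (fun x hx => hmono x (List.mem_cons_of_mem _ hx))
      simp [hp, hq]; omega
    · have := ih (fun x hx => hmono x (List.mem_cons_of_mem _ hx)) hc'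
      by_cases ha : q a = true
      · simp [ha, hmono a (List.mem_cons_self) ha]; omega
      · simp [List.countP_cons] at *
        by_cases hpa : p a = true <;> simp [ha, hpa] <;> omega

theorem nempty_set_lt (values : List String) (c : Nat) (s : String)
    (hc : c < 9) (he : values.getD c "X" = "") (hs : s ≠ "") :
    nempty (values.set c s) < nempty values := by
  rw [List.getD_eq_getElem?_getD] at he
  have hlen : c < values.length := by
    by_contra h
    rw [List.getElem?_eq_none (by omega)] at he
    simp at he
  unfold nempty posOf
  rw [← List.countP_eq_length_filter, ← List.countP_eq_length_filter]
  refine pv_countP_lt _ _ _ ?_ c (by simp [List.mem_range]; omega) ?_ ?_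
  · intro x hx hqx
    by_cases hxc : x = c
    · subst hxc
      rw [List.getD_eq_getElem?_getD, List.getElem?_set_self hlen] at hqx
      simp [hs] at hqx
    · rwa [List.getD_eq_getElem?_getD, List.getElem?_set_ne (by omega),
        ← List.getD_eq_getElem?_getD] at hqx
  · simp [List.getD_eq_getElem?_getD, he]
  · rw [List.getD_eq_getElem?_getD, List.getElem?_set_self hlen]
    simp [hs]

-- transliteration of A's loop body: bfAux cs … runs A's `for case in positions` over the
-- remaining positions cs; the dite guard (always true on posOf elements) is a totality guard.
def bfAux : List Nat → List (String × List String) → String → List String → Bool → List (String × List String)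
  | [], parties, _, _, _ => parties
  | case :: rest, parties, partie, values, tourX =>
    let parties' :=
      if h : case < 9 ∧ values.getD case "X" = "" then
        if tourX then
          let cpy_values := values.set case "X"
          let partie_new := partie ++ "X" ++ PySem.Int.toStr (case : Int)
          if fin_valide cpy_values then dInsert parties partie_new cpy_values
          else
            let ps := posOf cpy_values
            if ps.length > 0 then bfAux ps parties partie_new cpy_values false else parties
        else
          let cpy_values := values.set case "O"
          let partie_new := partie ++ "O" ++ PySem.Int.toStr (case : Int)
          if fin_valide cpy_values then dInsert parties partie_new cpy_values
          else
            let ps := posOf cpy_values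
            if ps.length > 0 then bfAux ps parties partie_new cpy_values true else parties
      else parties
    bfAux rest parties' partie values tourX
  termination_by cs _ _ values _ => (nempty values, cs.length)
  decreasing_by
  · exact Prod.Lex.left _ _ (nempty_set_lt values case "X" h.1 h.2 (by decide))
  · exact Prod.Lex.left _ _ (nempty_set_lt values case "O" h.1 h.2 (by decide))
  · exact Prod.Lex.right _ (Nat.lt_succ_self _)

def bruteforce_parties (parties : List (String × List String)) (partie : String) (values : List String) (tourX : Bool) : List (String × List String) :=
  let positions := posOf values
  if positions.length > 0 then bfAux positions parties partie values tourX else parties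

-- ===== PORT B =====

-- transliteration of B's fin_valide (any/all directly over the grid)
def fin_valide_b (values : List String) : Bool :=
  let winX := pyLines.any (fun line =>
    values.getD line.1 "" == "X" && values.getD line.2.1 "" == "X" && values.getD line.2.2 "" == "X")
  let winO := pyLines.any (fun line =>
    values.getD line.1 "" == "O" && values.getD line.2.1 "" == "O" && values.getD line.2.2 "" == "O")
  let draw := !(winX || winO) && !(values.contains "")
  (winX.xor winO).xor draw

-- transliteration of B's _games: the `for case in range(9)` loop over the remaining cases cs,
-- with out the accumulated list; the dite guard is Python's `values[case] != "": continue`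
-- together with case < 9 (automatic for elements of range(9); needed for totality).
def gamesAux : List Nat → List (String × List String) → String → List String → Bool → List (String × List String)
  | [], out, _, _, _ => out
  | case :: rest, out, partie, values, tourX =>
    let out' :=
      if h : case < 9 ∧ values.getD case "X" = "" then
        let sym := if tourX then "X" else "O"
        let cpy := values.set case sym
        let key := partie ++ sym ++ PySem.Int.toStr (case : Int)
        if fin_valide_b cpy then out ++ [(key, cpy)]
        else out ++ gamesAux (List.range 9) [] key cpy (!tourX)
      else out
    gamesAux rest out' partie values tourX
  termination_by cs _ _ values _ => (nempty values, cs.length)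
  decreasing_by
  · refine Prod.Lex.left _ _ (nempty_set_lt values case _ h.1 h.2 ?_)
    cases tourX <;> decide
  · exact Prod.Lex.right _ (Nat.lt_succ_self _)

def bruteforce_parties_alt (parties : List (String × List String)) (partie : String) (values : List String) (tourX : Bool) : List (String × List String) :=
  (gamesAux (List.range 9) [] partie values tourX).foldl (fun p kv => dInsert p kv.1 kv.2) parties

-- ===== PRECONDITION & SPEC =====
-- Pre_ excludes values of length < 9: there both Pythons raise IndexError (values[i] for i in range(9)).
def Pre_bruteforce_parties (parties : List (String × List String)) (partie : String) (values : List String) (tourX : Bool) : Prop :=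
  9 ≤ values.length
instance (parties : List (String × List String)) (partie : String) (values : List String) (tourX : Bool) : Decidable (Pre_bruteforce_parties parties partie values tourX) := by unfold Pre_bruteforce_parties; infer_instance

def pvWitness_bruteforce_parties : (List (String × List String)) × String × List String × Bool :=
  ([], "", ["X", "O", "X", "O", "X", "O", "X", "O", "X"], true)

def Spec_bruteforce_parties (parties : List (String × List String)) (partie : String) (values : List String) (tourX : Bool) (out : List (String × List String)) : Prop := out = bruteforce_parties_alt parties partie values tourX
instance (parties : List (String × List String)) (partie : String) (values : List String) (tourX : Bool) (out : List (String × List String)) : Decidable (Spec_bruteforce_parties parties partie values tourX out) := by unfold Spec_bruteforce_parties; infer_instance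

-- ===== CLAIM (what is proved, stated in full; the proofs are below) =====
def Claim_equal_bruteforce_parties : Prop := ∀ (parties : List (String × List String)) (partie : String) (values : List String) (tourX : Bool), Dom_bruteforce_parties parties partie values tourX → Pre_bruteforce_parties parties partie values tourX → Spec_bruteforce_parties parties partie values tourX (bruteforce_parties parties partie values tourX)

-- ===== LEMMAS AND PROOFS =====

theorem len_filter_empty (values : List String) :
    (((values.filter (fun c => c == "")).length) == 0) = !(values.contains "") := by
  induction values with
  | nil => rfl
  | cons a l ih =>
    by_cases h : a = "" <;> simp [h] <;> (simp at ih ⊢; tauto)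

theorem fin_valide_eq (values : List String) : fin_valide values = fin_valide_b values := by
  unfold fin_valide fin_valide_b
  simp only [pyLines, List.foldl, len_filter_empty,
    List.mem_filter, List.mem_range, List.any_cons, List.any_nil]
  simp only [true_and, Bool.decide_eq_true, Nat.reduceLT, Bool.false_or]
  simp only [Bool.or_assoc, Bool.or_false]

theorem gamesAux_nil (out : List (String × List String)) (partie : String)
    (values : List String) (tourX : Bool) : gamesAux [] out partie values tourX = out := by
  simp [gamesAux]

theorem bfAux_nil (parties : List (String × List String)) (partie : String)
    (values : List String) (tourX : Bool) : bfAux [] parties partie values tourX = parties := by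
  simp [bfAux]

theorem gamesAux_acc (values : List String) (cs : List Nat) :
    ∀ out partie tourX, gamesAux cs out partie values tourX =
      out ++ gamesAux cs [] partie values tourX := by
  induction cs with
  | nil => intro out partie tourX; simp [gamesAux]
  | cons c cs ih =>
    intro out partie tourX
    simp only [gamesAux]
    rw [ih]; conv_rhs => rw [ih]
    rw [← List.append_assoc]
    congr 1
    by_cases h : c < 9 ∧ values.getD c "X" = ""
    · rw [dif_pos h, dif_pos h]
      by_cases hf : fin_valide_b (values.set c (if tourX then "X" else "O")) <;> simp [hf]
    · rw [dif_neg h, dif_neg h]; simp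
theorem gamesAux_filter (values : List String) (cs : List Nat) (hcs : ∀ c ∈ cs, c < 9) :
    ∀ partie tourX, gamesAux cs [] partie values tourX =
      gamesAux (cs.filter (fun i => values.getD i "X" == "")) [] partie values tourX := by
  induction cs with
  | nil => intro partie tourX; rfl
  | cons c cs ih =>
    intro partie tourX
    have hc : c < 9 := hcs c List.mem_cons_self
    have ih' := ih (fun x hx => hcs x (List.mem_cons_of_mem _ hx))
    by_cases hq : values.getD c "X" = ""
    · rw [List.filter_cons_of_pos (by simp only [beq_iff_eq]; exact hq)]
      simp only [gamesAux]
      rw [gamesAux_acc, ih']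
      conv_rhs => rw [gamesAux_acc]
    · rw [List.filter_cons_of_neg (by simp only [beq_iff_eq]; exact hq)]
      simp only [gamesAux]
      have hng : ¬ (c < 9 ∧ values.getD c "X" = "") := by tauto
      rw [dif_neg hng]
      exact ih' partie tourX
theorem bfAux_eq (n : Nat) : ∀ values, nempty values ≤ n →
    ∀ cs, (∀ c ∈ cs, c < 9) → ∀ parties partie tourX,
    bfAux cs parties partie values tourX =
      (gamesAux cs [] partie values tourX).foldl (fun p kv => dInsert p kv.1 kv.2) parties := by
  induction n with
  | zero =>
    intro values hn cs hcs parties partie tourX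
    induction cs generalizing parties with
    | nil => rw [bfAux_nil, gamesAux_nil]; rfl
    | cons c cs ih =>
      have hguard : ¬ (c < 9 ∧ values.getD c "X" = "") := by
        rintro ⟨h1, h2⟩
        have hm : c ∈ posOf values := by
          simp only [posOf, List.mem_filter, List.mem_range, beq_iff_eq]
          exact ⟨h1, h2⟩
        have : 0 < nempty values := List.length_pos_of_mem hm
        omega
      simp only [bfAux, gamesAux]
      rw [dif_neg hguard, dif_neg hguard]
      exact ih (fun x hx => hcs x (List.mem_cons_of_mem _ hx)) parties
  | succ n ihn =>
    intro values hn cs hcs parties partie tourX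
    induction cs generalizing parties partie tourX with
    | nil => rw [bfAux_nil, gamesAux_nil]; rfl
    | cons c cs ih =>
      have ih' := fun parties partie tourX =>
        ih (fun x hx => hcs x (List.mem_cons_of_mem _ hx)) parties partie tourX
      have hrange : ∀ x ∈ List.range 9, x < 9 := by simp
      by_cases h : c < 9 ∧ values.getD c "X" = ""
      · simp only [bfAux, gamesAux]
        rw [ih']
        conv_rhs => rw [gamesAux_acc]
        rw [List.foldl_append]
        congr 1
        rw [dif_pos h, dif_pos h]
        have hbranch : ∀ (sym : String), sym ≠ "" → ∀ (t' : Bool),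
            (if fin_valide (values.set c sym) then
              dInsert parties ((partie ++ sym) ++ PySem.Int.toStr (c : Int)) (values.set c sym)
            else if (posOf (values.set c sym)).length > 0 then
              bfAux (posOf (values.set c sym)) parties
                ((partie ++ sym) ++ PySem.Int.toStr (c : Int)) (values.set c sym) t'
            else parties)
            = List.foldl (fun p kv => dInsert p kv.1 kv.2) parties
                (if fin_valide_b (values.set c sym) then
                  [(((partie ++ sym) ++ PySem.Int.toStr (c : Int)), values.set c sym)]
                else gamesAux (List.range 9) []
                  ((partie ++ sym) ++ PySem.Int.toStr (c : Int)) (values.set c sym) t') := by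
          intro sym hsym t'
          have hlt : nempty (values.set c sym) ≤ n := by
            have := nempty_set_lt values c sym h.1 h.2 hsym
            omega
          rw [fin_valide_eq]
          by_cases hf : fin_valide_b (values.set c sym)
          · rw [if_pos hf, if_pos hf]
            rfl
          · rw [if_neg hf, if_neg hf]
            have hgame : gamesAux (List.range 9) []
                ((partie ++ sym) ++ PySem.Int.toStr (c : Int)) (values.set c sym) t'
                = gamesAux (posOf (values.set c sym)) []
                  ((partie ++ sym) ++ PySem.Int.toStr (c : Int)) (values.set c sym) t' :=
              gamesAux_filter _ _ hrange _ _
            rw [hgame]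
            by_cases hl : (posOf (values.set c sym)).length > 0
            · rw [if_pos hl]
              exact ihn (values.set c sym) hlt (posOf (values.set c sym))
                (by intro x hx
                    simp only [posOf, List.mem_filter, List.mem_range] at hx
                    exact hx.1) parties _ t'
            · rw [if_neg hl]
              have hempty : posOf (values.set c sym) = [] := by
                cases hp : posOf (values.set c sym) with
                | nil => rfl
                | cons a l => rw [hp] at hl; simp at hl
              rw [hempty, gamesAux_nil]; rfl
        cases tourX
        · simpa using hbranch "O" (by decide) true
        · simpa using hbranch "X" (by decide) false
      · simp only [bfAux, gamesAux]
        rw [dif_neg h, dif_neg h]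
        exact ih' parties partie tourX
-- ===== VERDICT (by name: the statement is the Claim_ definition above) =====
theorem bruteforce_parties_spec : Claim_equal_bruteforce_parties := by
  intro parties partie values tourX _ _
  unfold Spec_bruteforce_parties bruteforce_parties bruteforce_parties_alt
  have hrange : ∀ x ∈ List.range 9, x < 9 := by simp
  have hfil := gamesAux_filter values (List.range 9) hrange partie tourX
  by_cases hl : (posOf values).length > 0
  · rw [if_pos hl, hfil]
    exact bfAux_eq (nempty values) values le_rfl (posOf values)
      (by intro x hx
          simp only [posOf, List.mem_filter, List.mem_range] at hx
          exact hx.1) parties partie tourX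
  · have hempty : posOf values = [] := by
      cases hp : posOf values with
      | nil => rfl
      | cons a l => rw [hp] at hl; simp at hl
    rw [if_neg hl, hfil]
    show parties = List.foldl _ parties (gamesAux (posOf values) [] partie values tourX)
    rw [hempty, gamesAux_nil]
    rfl
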